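-- pv_equiv track=rewrite | github.com/boumalaksiham/Final-Project-AI | agents/methodology_agent.py | _extract_methodology_section
-- ===== SOURCE A (Python) =====
-- def _extract_methodology_section(text: str) -> str:
--     """Try to isolate the methodology/experiments section."""
--     markers = ["method", "approach", "experiment", "model architecture", "proposed"]
--     lower = text.lower()
--     best_idx = -1
--     for marker in markers:
--         idx = lower.find(marker)
--         if idx != -1 and (best_idx == -1 or idx < best_idx):
--             best_idx = idx
--     if best_idx != -1:
--         return text[best_idx : best_idx + 8000]
--     return text[:8000]
-- ===== SOURCE B (Python) =====
-- def _extract_methodology_section(text: str) -> str: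
--     """Try to isolate the methodology/experiments section."""
--     markers = ["method", "approach", "experiment", "model architecture", "proposed"]
--     lower = text.lower()
--     for i in range(len(lower)):
--         if any(lower.startswith(m, i) for m in markers):
--             return text[i : i + 8000]
--     return text[:8000]
-- ===== Notes on version B (the rewrite author's own statement) =====
-- stated objective: alternative
-- what changed: Replaced the five separate lower.find(marker) calls with a hand-rolled minimum accumulator by a single left-to-right scan over positions that returns at the first position where any marker starts.
import Mathlib
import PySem

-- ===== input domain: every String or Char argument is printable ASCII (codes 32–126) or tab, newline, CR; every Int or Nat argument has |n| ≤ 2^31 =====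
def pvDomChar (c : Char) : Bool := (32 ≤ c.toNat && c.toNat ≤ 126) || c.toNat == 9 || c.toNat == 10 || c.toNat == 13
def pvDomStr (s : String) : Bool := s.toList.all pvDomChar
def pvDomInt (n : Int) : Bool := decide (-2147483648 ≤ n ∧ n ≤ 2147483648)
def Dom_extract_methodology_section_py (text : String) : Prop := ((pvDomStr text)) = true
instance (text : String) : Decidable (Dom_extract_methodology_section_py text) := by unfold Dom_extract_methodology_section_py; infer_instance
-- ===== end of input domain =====

-- B replaces five find() calls + a minimum accumulator by one left-to-right position scan
-- that returns at the first position where any marker starts (alternative decomposition).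

-- ===== PORT A =====
def pvMarkers : List String := ["method", "approach", "experiment", "model architecture", "proposed"]

def extract_methodology_section_py (text : String) : String :=
  let lower := PySem.Str.lower text
  let best_idx := pvMarkers.foldl (fun best_idx marker =>
      let idx := PySem.Str.find lower marker
      if idx ≠ -1 ∧ (best_idx = -1 ∨ idx < best_idx) then idx else best_idx) (-1)
  if best_idx ≠ -1 then PySem.Str.slice text (some best_idx) (some (best_idx + 8000))
  else PySem.Str.slice text none (some 8000)

-- ===== PORT B =====
-- B's 'for i in range(len(lower))' loop, transcribed as structural recursion on the
-- remaining suffix of the lowered text (i is the current position).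
def pvScanB (text : List Char) (i : Nat) (l : List Char) : String :=
  match l with
  | [] => String.ofList (PySem.List.slice text none (some 8000))
  | _ :: rest =>
    if pvMarkers.any (fun m => PySem.Chars.startswith l m.toList) then
      String.ofList (PySem.List.slice text (some (i : Int)) (some ((i : Int) + 8000)))
    else pvScanB text (i + 1) rest

def extract_methodology_section_py_alt (text : String) : String :=
  pvScanB text.toList 0 (PySem.Str.lower text).toList

-- ===== PRECONDITION & SPEC =====
def Spec_extract_methodology_section_py (text : String) (out : String) : Prop := out = extract_methodology_section_py_alt text
instance (text : String) (out : String) : Decidable (Spec_extract_methodology_section_py text out) := by unfold Spec_extract_methodology_section_py; infer_instance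

-- ===== CLAIM (what is proved, stated in full; the proofs are below) =====
def Claim_equal_extract_methodology_section_py : Prop := ∀ (text : String), Dom_extract_methodology_section_py text → Spec_extract_methodology_section_py text (extract_methodology_section_py text)

-- ===== LEMMAS AND PROOFS =====

-- the loop body of A's fold, as a named function (definitionally equal to the port's lambda)
def pvStep (lower : String) (b : Int) (m : String) : Int :=
  let idx := PySem.Str.find lower m
  if idx ≠ -1 ∧ (b = -1 ∨ idx < b) then idx else b

-- Str.slice as String.ofList of the list-level slice
theorem pvStrSlice_eq (s : String) (a? b? : Option Int) :
    PySem.Str.slice s a? b? = String.ofList (PySem.List.slice s.toList a? b?) := by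
  have h := PySem.Str.toList_slice s a? b?
  rw [PySem.Chars.slice_eq_listSlice] at h
  rw [← h, String.ofList_toList]

-- characterisation of A's minimum-accumulator fold: either nothing was found and the
-- accumulator is returned, or the result is the minimum of the non-(-1) find results
theorem pvFold_cases (lower : String) (ms : List String) : ∀ (b : Int),
    (ms.foldl (pvStep lower) b = b ∧
      ∀ m ∈ ms, PySem.Str.find lower m = -1 ∨ (b ≠ -1 ∧ b ≤ PySem.Str.find lower m)) ∨
    (∃ m ∈ ms, ms.foldl (pvStep lower) b = PySem.Str.find lower m ∧
      PySem.Str.find lower m ≠ -1 ∧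
      (b = -1 ∨ ms.foldl (pvStep lower) b < b) ∧
      ∀ m' ∈ ms, PySem.Str.find lower m' = -1 ∨ ms.foldl (pvStep lower) b ≤ PySem.Str.find lower m') := by
  induction ms with
  | nil => intro b; left; simp
  | cons m rest ih =>
    intro b
    simp only [List.foldl_cons]
    by_cases hc : PySem.Str.find lower m ≠ -1 ∧ (b = -1 ∨ PySem.Str.find lower m < b)
    · have hb' : pvStep lower b m = PySem.Str.find lower m := by
        simp only [pvStep]; rw [if_pos hc]
      rw [hb']
      rcases ih (PySem.Str.find lower m) with ⟨hr, hall⟩ | ⟨m'', hm'', hr, hne, hlt, hall⟩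
      · right
        rw [hr]
        refine ⟨m, by simp, rfl, hc.1, hc.2, ?_⟩
        intro m' hm'
        rcases List.mem_cons.mp hm' with rfl | hm'
        · exact Or.inr le_rfl
        · rcases hall m' hm' with h | h
          · exact Or.inl h
          · exact Or.inr h.2
      · right
        rw [hr] at hlt hall ⊢
        refine ⟨m'', by simp [hm''], rfl, hne, ?_, ?_⟩
        · have h2 : PySem.Str.find lower m'' < PySem.Str.find lower m := by
            rcases hlt with h2 | h2
            · exact absurd h2 hc.1
            · exact h2
          rcases hc.2 with h | h
          · exact Or.inl h
          · right; omega
        · intro m' hm'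
          rcases List.mem_cons.mp hm' with rfl | hm'
          · rcases hlt with h2 | h2
            · exact Or.inl h2
            · exact Or.inr (le_of_lt h2)
          · exact hall m' hm' 
    · have hb' : pvStep lower b m = b := by
        simp only [pvStep]; rw [if_neg hc]
      rw [hb']
      rcases ih b with ⟨hr, hall⟩ | ⟨m'', hm'', hr, hne, hlt, hall⟩
      · left
        refine ⟨hr, ?_⟩
        intro m' hm'
        rcases List.mem_cons.mp hm' with rfl | hm'
        · by_cases h1 : PySem.Str.find lower m' = -1
          · exact Or.inl h1
          · have h4 : ¬ (b = -1 ∨ PySem.Str.find lower m' < b) := fun h => hc ⟨h1, h⟩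
            right; constructor <;> omega
        · exact hall m' hm'
      · right
        rw [hr] at hlt hall ⊢
        refine ⟨m'', by simp [hm''], rfl, hne, hlt, ?_⟩
        intro m' hm'
        rcases List.mem_cons.mp hm' with rfl | hm'
        · by_cases h1 : PySem.Str.find lower m' = -1
          · exact Or.inl h1
          · have h4 : ¬ (b = -1 ∨ PySem.Str.find lower m' < b) := fun h => hc ⟨h1, h⟩
            right; omega
        · exact hall m' hm' 

-- B's scan returns the fallback slice when no marker occurs anywhere
theorem pvScanB_none (t L : List Char)
    (hno : ∀ j, (pvMarkers.any fun m => PySem.Chars.startswith (L.drop j) m.toList) = false) :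
    ∀ (i : Nat) (l : List Char), l = L.drop i →
      pvScanB t i l = String.ofList (PySem.List.slice t none (some 8000)) := by
  intro i l
  induction l generalizing i with
  | nil => intro _; simp [pvScanB]
  | cons c rest ih =>
    intro hl
    have hcond := hno i
    rw [← hl] at hcond
    rw [pvScanB, hcond]
    simp only [Bool.false_eq_true, if_false]
    exact ih (i + 1) (by rw [← List.tail_drop, ← hl]; rfl)

-- B's scan returns the slice at the least position j where some marker starts
theorem pvScanB_found (t L : List Char) (j : Nat)
    (hQ : (pvMarkers.any fun m => PySem.Chars.startswith (L.drop j) m.toList) = true)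
    (hmin : ∀ k < j, (pvMarkers.any fun m => PySem.Chars.startswith (L.drop k) m.toList) = false) :
    ∀ (i : Nat) (l : List Char), l = L.drop i → i ≤ j →
      pvScanB t i l = String.ofList (PySem.List.slice t (some (j : Int)) (some ((j : Int) + 8000))) := by
  intro i l
  induction l generalizing i with
  | nil =>
    intro hl hij
    exfalso
    have hlen : L.length ≤ i := List.drop_eq_nil_iff.mp hl.symm
    have hj : L.drop j = [] := List.drop_eq_nil_iff.mpr (by omega)
    rw [hj] at hQ
    revert hQ; decide
  | cons c rest ih =>
    intro hl hij
    by_cases hc : (pvMarkers.any fun m => PySem.Chars.startswith (L.drop i) m.toList) = true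
    · have hij' : i = j := by
        by_contra hne
        have hlt : i < j := lt_of_le_of_ne hij hne
        rw [hmin i hlt] at hc
        exact absurd hc (by simp)
      subst hij'
      rw [← hl] at hc
      rw [pvScanB, hc]
      simp
    · have hcf : (pvMarkers.any fun m => PySem.Chars.startswith (L.drop i) m.toList) = false := by
        simpa using hc
      have hne : i ≠ j := by
        intro h; rw [h, hQ] at hcf; cases hcf
      rw [← hl] at hcf
      rw [pvScanB, hcf]
      simp only [Bool.false_eq_true, if_false]
      exact ih (i + 1) (by rw [← List.tail_drop, ← hl]; rfl) (by omega)

-- ===== VERDICT (by name: the statement is the Claim_ definition above) =====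
theorem extract_methodology_section_py_spec : Claim_equal_extract_methodology_section_py := by
  intro text _
  unfold Spec_extract_methodology_section_py
  set lower := PySem.Str.lower text with hlower
  set L := lower.toList with hL
  set r := pvMarkers.foldl (pvStep lower) (-1) with hrdef
  have hA : extract_methodology_section_py text =
      (if r ≠ -1 then PySem.Str.slice text (some r) (some (r + 8000))
       else PySem.Str.slice text none (some 8000)) := rfl
  have hB : extract_methodology_section_py_alt text = pvScanB text.toList 0 L := rfl
  rcases pvFold_cases lower pvMarkers (-1) with ⟨hr, hall⟩ | ⟨m₀, hm₀, hr, hne, _, hall⟩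
  all_goals (try rw [← hrdef] at hr)
  all_goals (try rw [← hrdef] at hall)
  · -- no marker occurs: A takes the fallback branch, B scans off the end
    have hall' : ∀ m ∈ pvMarkers, PySem.Str.find lower m = -1 := by
      intro m hm
      rcases hall m hm with h | h
      · exact h
      · exact absurd rfl h.1
    have hno : ∀ j, (pvMarkers.any fun m => PySem.Chars.startswith (L.drop j) m.toList) = false := by
      intro j
      by_contra h
      rcases List.any_eq_true.mp (by simpa using h) with ⟨m, hm, hsw⟩
      have hpre : m.toList <+: L.drop j := (PySem.Chars.startswith_iff _ _).mp hsw
      have hinf : m.toList <:+: L :=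
        (PySem.Chars.isIn_iff_infix _ _).mp
          ((PySem.Chars.exists_prefix_drop_iff_isIn _ _).mp ⟨j, hpre⟩)
      have hfind : PySem.Chars.find L m.toList ≠ -1 := (PySem.Chars.find_ne_neg_one_iff _ _).mpr hinf
      rw [hL, ← PySem.Str.find_eq] at hfind
      exact hfind (hall' m hm)
    rw [hA, hB, if_neg (by simp [hr]), pvStrSlice_eq]
    exact (pvScanB_none text.toList L hno 0 L (by simp)).symm
  · -- some marker occurs: A's fold result is the least position where some marker starts
    have hr0 : 0 ≤ r := by
      have h1 := PySem.Chars.neg_one_le_find L m₀.toList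
      rw [hL, ← PySem.Str.find_eq] at h1
      rw [← hr] at h1
      omega
    set N := r.toNat with hN
    have hrN : r = (N : Int) := by omega
    have hfm₀ : PySem.Chars.find L m₀.toList = r := by
      rw [hr, PySem.Str.find_eq, ← hL]
    have hspec := PySem.Chars.find_spec (s := L) (sub := m₀.toList) (by rw [hfm₀]; omega)
    have hQ : (pvMarkers.any fun m => PySem.Chars.startswith (L.drop N) m.toList) = true := by
      apply List.any_eq_true.mpr
      refine ⟨m₀, hm₀, (PySem.Chars.startswith_iff _ _).mpr ?_⟩
      have h1 := hspec.1
      rwa [hfm₀, hrN, Int.toNat_natCast] at h1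
    have hmin : ∀ k < N, (pvMarkers.any fun m => PySem.Chars.startswith (L.drop k) m.toList) = false := by
      intro k hk
      by_contra h
      rcases List.any_eq_true.mp (by simpa using h) with ⟨m, hm, hsw⟩
      have hpre : m.toList <+: L.drop k := (PySem.Chars.startswith_iff _ _).mp hsw
      have hinf : m.toList <:+: L :=
        (PySem.Chars.isIn_iff_infix _ _).mp
          ((PySem.Chars.exists_prefix_drop_iff_isIn _ _).mp ⟨k, hpre⟩)
      have hfm : 0 ≤ PySem.Chars.find L m.toList := (PySem.Chars.find_nonneg_iff _ _).mpr hinf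
      have hspec' := PySem.Chars.find_spec (s := L) (sub := m.toList) hfm
      have hle : (PySem.Chars.find L m.toList).toNat ≤ k := by
        by_contra h2
        exact hspec'.2 k (by omega) hpre
      have hrle : r ≤ PySem.Chars.find L m.toList := by
        have h3 := hall m hm
        rw [PySem.Str.find_eq, ← hL] at h3
        rcases h3 with h3 | h3
        · omega
        · exact h3
      omega
    rw [hA, hB, if_pos (by rw [hr]; exact hne), pvStrSlice_eq,
        pvScanB_found text.toList L N hQ hmin 0 L (by simp) (Nat.zero_le _), hrN]
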